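-- pv_equiv track=rewrite | github.com/AartiBhagtani/Algorithms | Companies/nectore/prob1.py | MaxPairs
-- ===== SOURCE A (Python) =====
-- import math
--
-- def lsb_set(num):
--     b_r = bin(num).replace("0b", "")
--     index = 0
--     for i in range(len(b_r)-1, -1, -1):
--         index += 1
--         if b_r[i] == '1':
--             return index
--     return index
--
-- def MaxPairs (N, nums):
--     # Write your code here
--     score = 0
--     odd_count = 0
--     temp_list = []
--     sort_list = []
--     for i in nums:
--         if i % 2 != 0:
--             odd_count += 1
--         else:
--             temp_list.append(i)
--     score += math.ceil(odd_count/2)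
--
--     for i in temp_list:
--         sort_list.append(lsb_set(i))
--
--     sort_list.sort()
--     for i in range(len(sort_list)-1):
--         score += max(sort_list[i], sort_list[i+1])
--     return score
-- ===== SOURCE B (Python) =====
-- def _lsb(num):
--     # 1-based position of the lowest set bit; 1 for num == 0 (no set bit).
--     if num == 0:
--         return 1
--     num = abs(num)
--     p = 1
--     while num % 2 == 0:
--         num //= 2
--         p += 1
--     return p
--
-- def MaxPairs(N, nums):
--     # One pass: count odds; for evens keep the running sum and minimum of the
--     # lsb positions.  Sum of max over consecutive elements of the sorted list
--     # equals (total sum - minimum), so no list, no sort.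
--     odd = 0
--     total = 0
--     mn = None
--     for x in nums:
--         if x % 2 != 0:
--             odd += 1
--         else:
--             v = _lsb(x)
--             total += v
--             if mn is None or v < mn:
--                 mn = v
--     score = (odd + 1) // 2
--     if mn is not None:
--         score += total - mn
--     return score
-- ===== Notes on version B (the rewrite author's own statement) =====
-- stated objective: faster
-- what changed: B replaces A's string-based bin() scan, intermediate lists and sort (sum of max over consecutive sorted lsb positions) by a single pass that counts odds and keeps the running sum and minimum of the lsb positions, using sorted-consecutive-max sum = total sum minus minimum.
import Mathlib
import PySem

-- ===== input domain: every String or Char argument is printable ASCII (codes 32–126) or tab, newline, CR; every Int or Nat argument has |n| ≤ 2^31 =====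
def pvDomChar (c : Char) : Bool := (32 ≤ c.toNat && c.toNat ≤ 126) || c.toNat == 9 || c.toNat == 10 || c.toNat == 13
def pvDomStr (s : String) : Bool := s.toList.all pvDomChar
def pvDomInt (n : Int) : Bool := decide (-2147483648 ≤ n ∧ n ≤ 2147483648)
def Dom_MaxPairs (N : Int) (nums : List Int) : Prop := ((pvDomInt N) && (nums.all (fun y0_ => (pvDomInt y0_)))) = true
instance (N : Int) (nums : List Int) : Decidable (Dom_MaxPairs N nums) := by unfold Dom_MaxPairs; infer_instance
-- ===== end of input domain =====

-- B replaces A's "build the list of lsb positions, sort it, sum max over consecutive pairs"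
-- by a single pass keeping the running sum and minimum of those positions (for a sorted list,
-- the sum of consecutive maxima is the total sum minus the minimum); objective: faster.

-- ===== PORT A =====
-- digits of bin(n) for n : Nat, without the '0b' prefix, most-significant first
-- (hand port of the builtin bin; exact for n > 0, [] for 0 — bin's "0" is added in binRepr)
def natBinChars (n : Nat) : List Char :=
  if _h : n = 0 then [] else natBinChars (n / 2) ++ [if n % 2 = 1 then '1' else '0']
  termination_by n
  decreasing_by exact Nat.div_lt_self (Nat.pos_of_ne_zero _h) one_lt_two

-- bin(num).replace("0b", "") as a character list: optional '-' sign, then the binary digits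
def binRepr (num : Int) : List Char :=
  (if num < 0 then ['-'] else []) ++ (if num = 0 then ['0'] else natBinChars num.natAbs)

-- the for-loop of lsb_set: walk the characters from the END of the string, index += 1,
-- return index at the first '1'; return the final index after the loop
def lsbLoop : List Char → Int → Int
  | [], index => index
  | c :: rest, index => if c = '1' then index + 1 else lsbLoop rest (index + 1)

def lsbSet (num : Int) : Int := lsbLoop (binRepr num).reverse 0

def MaxPairs (N : Int) (nums : List Int) : Int :=
  let st := nums.foldl
    (fun (st : Int × List Int) i =>
      if PySem.Int.mod i 2 ≠ 0 then (st.1 + 1, st.2) else (st.1, st.2 ++ [i]))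
    ((0 : Int), ([] : List Int))
  -- math.ceil(odd_count/2): exact on ints as the ceiling division -((-odd_count) // 2)
  let score : Int := 0 + -(PySem.Int.floordiv (-st.1) 2)
  let sort_list := st.2.foldl (fun acc i => acc ++ [lsbSet i]) ([] : List Int)
  let s := PySem.List.sorted sort_list (fun x => x) false
  (PySem.List.pyRange 0 ((s.length : Int) - 1) 1).foldl
    (fun sc i => sc + max (PySem.List.pyGetD s i 0) (PySem.List.pyGetD s (i + 1) 0)) score

-- ===== PORT B =====
-- the while-loop of _lsb, on abs(num) : Nat; the 'n ≠ 0' guard only makes the recursion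
-- well-founded — _lsb never reaches it with 0 (Python's loop would not terminate there)
def lsbAltNat (n : Nat) (p : Int) : Int :=
  if h : n % 2 = 0 ∧ n ≠ 0 then lsbAltNat (n / 2) (p + 1) else p
  termination_by n
  decreasing_by exact Nat.div_lt_self (Nat.pos_of_ne_zero h.2) one_lt_two

def lsbAlt (num : Int) : Int := if num = 0 then 1 else lsbAltNat num.natAbs 1

def MaxPairs_alt (N : Int) (nums : List Int) : Int :=
  let st := nums.foldl
    (fun (st : Int × Int × Option Int) x =>
      if PySem.Int.mod x 2 ≠ 0 then (st.1 + 1, st.2.1, st.2.2)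
      else
        let v := lsbAlt x
        (st.1, st.2.1 + v,
          some (match st.2.2 with | none => v | some m => if v < m then v else m)))
    ((0 : Int), (0 : Int), (none : Option Int))
  let score : Int := PySem.Int.floordiv (st.1 + 1) 2
  match st.2.2 with
  | none => score
  | some m => score + (st.2.1 - m)

-- ===== PRECONDITION & SPEC =====
def Spec_MaxPairs (N : Int) (nums : List Int) (out : Int) : Prop := out = MaxPairs_alt N nums
instance (N : Int) (nums : List Int) (out : Int) : Decidable (Spec_MaxPairs N nums out) := by unfold Spec_MaxPairs; infer_instance

-- ===== CLAIM (what is proved, stated in full; the proofs are below) =====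
def Claim_equal_MaxPairs : Prop := ∀ (N : Int) (nums : List Int), Dom_MaxPairs N nums → Spec_MaxPairs N nums (MaxPairs N nums)

-- ===== LEMMAS AND PROOFS =====

lemma natBinChars_eq (n : Nat) :
    natBinChars n = if n = 0 then [] else natBinChars (n / 2) ++ [if n % 2 = 1 then '1' else '0'] := by
  rw [natBinChars]
  split_ifs <;> rfl

lemma lsbAltNat_eq (n : Nat) (p : Int) :
    lsbAltNat n p = if n % 2 = 0 ∧ n ≠ 0 then lsbAltNat (n / 2) (p + 1) else p := by
  rw [lsbAltNat]
  split_ifs <;> rfl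

lemma lsbLoop_shift (l : List Char) (idx : Int) : lsbLoop l idx = idx + lsbLoop l 0 := by
  induction l generalizing idx with
  | nil => simp [lsbLoop]
  | cons c rest ih =>
    by_cases h : c = '1'
    · simp [lsbLoop, h]
    · simp only [lsbLoop, if_neg h]
      rw [ih (idx + 1), ih (0 + 1)]
      ring

lemma one_mem_natBinChars (n : Nat) (h : n ≠ 0) : '1' ∈ natBinChars n := by
  induction n using Nat.strong_induction_on with
  | _ n ih =>
    rw [natBinChars_eq, if_neg h]
    by_cases hp : n % 2 = 1
    · simp [hp]
    · have hhalf : n / 2 ≠ 0 := by omega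
      have := ih (n / 2) (Nat.div_lt_self (Nat.pos_of_ne_zero h) one_lt_two) hhalf
      simp [this]

lemma lsbLoop_append_of_mem (l t : List Char) (h : '1' ∈ l) (idx : Int) :
    lsbLoop (l ++ t) idx = lsbLoop l idx := by
  induction l generalizing idx with
  | nil => simp at h
  | cons c rest ih =>
    by_cases hc : c = '1'
    · simp [lsbLoop, hc]
    · have hr : '1' ∈ rest := by
        rcases List.mem_cons.mp h with h1 | h1
        · exact absurd h1.symm hc
        · exact h1
      simp [lsbLoop, hc, ih hr]

lemma lsbAltNat_shift (n : Nat) (p : Int) : lsbAltNat n (p + 1) = 1 + lsbAltNat n p := by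
  induction n using Nat.strong_induction_on generalizing p with
  | _ n ih =>
    by_cases h : n % 2 = 0 ∧ n ≠ 0
    · rw [lsbAltNat_eq, if_pos h, lsbAltNat_eq n, if_pos h,
        ih (n / 2) (Nat.div_lt_self (Nat.pos_of_ne_zero h.2) one_lt_two)]
    · rw [lsbAltNat_eq, if_neg h, lsbAltNat_eq, if_neg h]
      ring

lemma lsb_eq_of_ne (n : Nat) (h : n ≠ 0) :
    lsbLoop (natBinChars n).reverse 0 = lsbAltNat n 1 := by
  induction n using Nat.strong_induction_on with
  | _ n ih =>
    rw [natBinChars_eq, if_neg h, List.reverse_append, List.reverse_singleton,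
      List.singleton_append]
    by_cases hp : n % 2 = 1
    · rw [lsbAltNat_eq, if_neg (show ¬ (n % 2 = 0 ∧ n ≠ 0) by omega)]
      simp [lsbLoop, hp]
    · have h2 : n % 2 = 0 := by omega
      have hhalf : n / 2 ≠ 0 := by omega
      have hdec := Nat.div_lt_self (Nat.pos_of_ne_zero h) one_lt_two
      have hc : ¬ ((if n % 2 = 1 then '1' else '0') = '1') := by simp [hp]
      rw [show lsbLoop ((if n % 2 = 1 then '1' else '0') :: (natBinChars (n / 2)).reverse) 0
            = lsbLoop (natBinChars (n / 2)).reverse (0 + 1) from by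
          simp [lsbLoop, hc],
        lsbLoop_shift, ih (n / 2) hdec hhalf,
        lsbAltNat_eq n, if_pos ⟨h2, h⟩, lsbAltNat_shift]
      ring

lemma lsb_eq (num : Int) : lsbSet num = lsbAlt num := by
  by_cases h0 : num = 0
  · subst h0; decide
  · have hn : num.natAbs ≠ 0 := by simpa using h0
    unfold lsbSet lsbAlt binRepr
    rw [if_neg h0]
    by_cases hneg : num < 0
    · rw [if_pos hneg, if_neg h0, List.reverse_append, List.reverse_singleton,
        lsbLoop_append_of_mem _ _ (List.mem_reverse.mpr (one_mem_natBinChars _ hn))]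
      exact lsb_eq_of_ne _ hn
    · rw [if_neg hneg, if_neg h0, List.nil_append]
      exact lsb_eq_of_ne _ hn

-- A's first loop: the pair (odd_count, temp_list)
lemma foldA_char (P : Int → Prop) [DecidablePred P] (nums : List Int) (a : Int) (l : List Int) :
    nums.foldl
      (fun (st : Int × List Int) i => if P i then (st.1 + 1, st.2) else (st.1, st.2 ++ [i]))
      (a, l)
    = (a + (nums.countP (fun i => decide (P i)) : Int),
       l ++ nums.filter (fun i => decide (¬ P i))) := by
  induction nums generalizing a l with
  | nil => simp
  | cons x rest ih =>
    simp only [List.foldl_cons]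
    by_cases hP : P x
    · rw [if_pos hP, ih, List.countP_cons, List.filter_cons]
      simp only [hP, decide_true, decide_not, Bool.not_true, Bool.false_eq_true, if_false,
        if_true]
      refine Prod.ext ?_ rfl
      push_cast
      ring
    · rw [if_neg hP, ih, List.countP_cons, List.filter_cons]
      simp only [hP, decide_false, decide_not, Bool.not_false, Bool.false_eq_true, if_false,
        if_true]
      refine Prod.ext (by push_cast; ring) ?_
      simp

-- running minimum with an Option accumulator = fold of min over the first element
lemma minOpt_cons (r : List Int) (x : Int) :
    r.foldl (fun (o : Option Int) v =>
        some (match o with | none => v | some m => if v < m then v else m)) (some x)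
    = some (r.foldl min x) := by
  induction r generalizing x with
  | nil => rfl
  | cons y rest ih =>
    simp only [List.foldl_cons, ih]
    have : (if y < x then y else x) = min x y := by rw [min_def]; split_ifs <;> omega
    rw [this]

-- B's loop: (odd_count, running sum, running minimum) over f of the non-P elements
lemma foldB_char (P : Int → Prop) [DecidablePred P] (f : Int → Int) (nums : List Int)
    (a tot : Int) (o : Option Int) :
    nums.foldl
      (fun (st : Int × Int × Option Int) x =>
        if P x then (st.1 + 1, st.2.1, st.2.2)
        else
          let v := f x
          (st.1, st.2.1 + v,
            some (match st.2.2 with | none => v | some m => if v < m then v else m)))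
      (a, tot, o)
    = (a + (nums.countP (fun i => decide (P i)) : Int),
       tot + ((nums.filter (fun i => decide (¬ P i))).map f).sum,
       ((nums.filter (fun i => decide (¬ P i))).map f).foldl
         (fun (o : Option Int) v =>
           some (match o with | none => v | some m => if v < m then v else m)) o) := by
  induction nums generalizing a tot o with
  | nil => simp
  | cons x rest ih =>
    simp only [List.foldl_cons]
    by_cases hP : P x
    · rw [if_pos hP, ih, List.countP_cons, List.filter_cons]
      simp only [hP, decide_true, decide_not, Bool.not_true, Bool.false_eq_true, if_false,
        if_true]
      refine Prod.ext (by push_cast; ring) rfl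
    · rw [if_neg hP, ih, List.countP_cons, List.filter_cons]
      simp only [hP, decide_false, decide_not, Bool.not_false, Bool.false_eq_true, if_false,
        if_true, List.map_cons, List.sum_cons, List.foldl_cons]
      refine Prod.ext (by push_cast; try ring) (Prod.ext (by ring) rfl)

-- getD over range indexes reproduces the list
lemma map_range_getD (l : List Int) (d : Int) :
    (List.range l.length).map (fun k => l.getD k d) = l := by
  induction l with
  | nil => simp
  | cons h t ih =>
    rw [List.length_cons, List.range_succ_eq_map, List.map_cons, List.map_map]
    simp only [List.getD_cons_zero]
    congr 1

-- ceil(a/2) = (a+1) // 2 on ints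
lemma ceil_half (a : Int) : -(PySem.Int.floordiv (-a) 2) = PySem.Int.floordiv (a + 1) 2 := by
  rw [PySem.Int.floordiv_eq_ediv_of_pos (by norm_num),
    PySem.Int.floordiv_eq_ediv_of_pos (by norm_num)]
  omega

-- the pair-max loop of A over the sorted list, written with B's running sum and minimum
lemma pair_loop (L : List Int) (c : Int) :
    (PySem.List.pyRange 0 (((PySem.List.sorted L (fun x => x) false).length : Int) - 1) 1).foldl
      (fun sc i => sc + max (PySem.List.pyGetD (PySem.List.sorted L (fun x => x) false) i 0)
                            (PySem.List.pyGetD (PySem.List.sorted L (fun x => x) false) (i + 1) 0)) c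
    = match L.foldl (fun (o : Option Int) v =>
           some (match o with | none => v | some m => if v < m then v else m)) none with
      | none => c
      | some m => c + (L.sum - m) := by
  rcases L with _ | ⟨x, r⟩
  · rw [show PySem.List.sorted ([] : List Int) (fun x => x) false = [] from
      (PySem.List.sorted_eq_nil_iff _ _ _).mpr rfl]
    simp [PySem.List.pyRange_one_eq_nil]
  · simp only [List.foldl_cons, minOpt_cons]
    obtain ⟨h, t, hnil⟩ : ∃ h t, PySem.List.sorted (x :: r) (fun x => x) false = h :: t := by
      rcases hS : PySem.List.sorted (x :: r) (fun x => x) false with _ | ⟨h', t'⟩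
      · exact absurd ((PySem.List.sorted_eq_nil_iff _ _ _).mp hS) (by simp)
      · exact ⟨h', t', rfl⟩
    have hperm : (PySem.List.sorted (x :: r) (fun x => x) false).Perm (x :: r) :=
      PySem.List.sorted_perm _ _ _
    have hhead : ∀ y ∈ (x :: r), h ≤ y :=
      PySem.List.key_head_sorted_le (x :: r) (fun x => x) hnil
    -- the head of the sorted list is B's running minimum
    have hm : r.foldl min x = h := by
      have hmem : r.foldl min x ∈ (x :: r) := by
        rcases PySem.List.foldl_min_mem r x with h1 | h1
        · rw [h1]; simp
        · exact List.mem_cons_of_mem _ h1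
      have hle : r.foldl min x ≤ h := by
        have hhs : h ∈ (x :: r) := hperm.mem_iff.mp (by rw [hnil]; simp)
        rcases List.mem_cons.mp hhs with h1 | h1
        · rw [h1]; exact (PySem.List.foldl_min_le r x).1
        · exact (PySem.List.foldl_min_le r x).2 h h1
      exact le_antisymm hle (hhead _ hmem)
    have hsum : (x :: r).sum = h + t.sum := by
      rw [← hperm.sum_eq, hnil, List.sum_cons]
    -- consecutive entries of the sorted list are monotone
    have hmono : ∀ k, k + 1 < t.length + 1 → (h :: t).getD k 0 ≤ (h :: t).getD (k + 1) 0 := by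
      intro k hk
      have hk1 : k + 1 < (PySem.List.sorted (x :: r) (fun x => x) false).length := by
        rw [hnil]; simpa using hk
      have hmono' := PySem.List.sorted_id_getElem_mono (x :: r) (Nat.le_succ k) hk1
      rw [List.getD_eq_getElem _ _ (by rw [hnil] at hk1; simp at hk1 ⊢; omega),
          List.getD_eq_getElem _ _ (by rw [hnil] at hk1; simpa using hk1)]
      simpa [hnil] using hmono'
    rw [hnil, show (((h :: t).length : Int) - 1) = (t.length : Int) from by simp,
      PySem.List.pyRange_zero_nat, List.foldl_map, PySem.List.foldl_add, hsum, hm]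
    have hmap : (List.range t.length).map
        (fun k => max (PySem.List.pyGetD (h :: t) ((k : Nat) : Int) 0)
                      (PySem.List.pyGetD (h :: t) (((k : Nat) : Int) + 1) 0)) = t := by
      rw [List.map_congr_left (g := fun k => t.getD k 0) ?_, map_range_getD]
      intro k hk
      have hk' : k < t.length := List.mem_range.mp hk
      have hcast : (((k : Nat) : Int) + 1) = (((k + 1 : Nat)) : Int) := by push_cast; ring
      rw [hcast, PySem.List.pyGetD_natCast, PySem.List.pyGetD_natCast,
        max_eq_right (hmono k (by omega))]
      simp
    rw [hmap]
    ring

-- ===== VERDICT (by name: the statement is the Claim_ definition above) =====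
theorem MaxPairs_spec : Claim_equal_MaxPairs := by
  intro N nums _
  show MaxPairs N nums = MaxPairs_alt N nums
  simp only [MaxPairs, MaxPairs_alt]
  rw [foldA_char (fun i => PySem.Int.mod i 2 ≠ 0),
    foldB_char (fun i => PySem.Int.mod i 2 ≠ 0) lsbAlt]
  dsimp only
  rw [PySem.List.foldl_append_singleton_eq_map, List.nil_append,
    show List.map lsbSet = List.map lsbAlt from
      funext (fun l => List.map_congr_left (fun a _ => lsb_eq a)),
    pair_loop, ceil_half]
  simp only [List.nil_append]
  rcases hv : ((nums.filter (fun i => decide (¬ PySem.Int.mod i 2 ≠ 0))).map lsbAlt).foldl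
      (fun (o : Option Int) v =>
        some (match o with | none => v | some m => if v < m then v else m)) none with _ | m <;>
    dsimp only <;> ring
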